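-- pv_equiv track=rewrite | github.com/dtdivyansh/Competemtive-Comding--- | HackerRank- Funny String.py | funnyString
-- ===== SOURCE A (Python) =====
-- def funnyString(s):
--     n1 = ord(s[0])
--     n2 = ord(s[-1])
--     n = len(s)
--     for i in range(1,n):
--         v1 = abs(n1-ord(s[i]))
--         v2 = abs(n2-ord(s[n-i-1]))
--         if(v1!=v2):
--             return 'Not Funny'
--         else:
--             n1 = ord(s[i])
--             n2 = ord(s[n-i-1])
--     return 'Funny'
-- ===== SOURCE B (Python) =====
-- def funnyString(s):
--     diffs = [abs(ord(s[i]) - ord(s[i - 1])) for i in range(1, len(s))]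
--     return 'Funny' if diffs == diffs[::-1] else 'Not Funny'
-- ===== Notes on version B (the rewrite author's own statement) =====
-- stated objective: simpler
-- what changed: A's interleaved two-pointer loop with running state and early return is replaced by building the list of adjacent absolute differences once and checking it is a palindrome (diffs == diffs[::-1]); the comprehension plus C-level slice/compare is also measurably faster than A's per-character Python loop.
-- crash fix: On the empty string A raises IndexError (it reads s[0]); B returns the funny verdict, since the empty diff list is trivially a palindrome. — e.g. on funnyString(""): A raises IndexError, B returns "Funny"
import Mathlib
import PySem

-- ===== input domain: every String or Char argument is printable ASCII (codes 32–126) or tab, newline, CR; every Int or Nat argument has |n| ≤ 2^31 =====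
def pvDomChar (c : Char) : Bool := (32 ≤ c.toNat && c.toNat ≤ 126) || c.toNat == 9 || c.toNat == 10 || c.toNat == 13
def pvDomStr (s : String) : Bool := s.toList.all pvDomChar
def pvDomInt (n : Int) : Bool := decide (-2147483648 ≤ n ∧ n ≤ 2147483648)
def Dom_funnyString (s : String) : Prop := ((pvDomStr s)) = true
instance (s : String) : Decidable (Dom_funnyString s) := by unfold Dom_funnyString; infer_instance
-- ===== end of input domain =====

-- B replaces A's two-pointer loop by a diffs-table + palindrome check; A raises on "" (excluded by Pre_), B returns 'Funny' there.

-- ===== PORT A =====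
-- ord of character at Nat index j (value irrelevant outside Pre_, where Python raised earlier)
def pvOrdAt (cs : List Char) (j : Nat) : Int := ((cs.getD j 'a').toNat : Int)

-- the for-loop of A: consumes the index list range(1,n), carrying n1 n2; early return on mismatch
def funnyLoopA (cs : List Char) (n : Nat) : Int → Int → List Nat → String
  | _, _, [] => "Funny"
  | n1, n2, i :: rest =>
    let v1 := (n1 - pvOrdAt cs i).natAbs
    let v2 := (n2 - pvOrdAt cs (n - i - 1)).natAbs
    if v1 ≠ v2 then "Not Funny"
    else funnyLoopA cs n (pvOrdAt cs i) (pvOrdAt cs (n - i - 1)) rest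

def funnyString (s : String) : String :=
  let cs := s.toList
  let n := cs.length
  -- s[0] and s[-1]: on Pre_ (s ≠ "") these are cs[0] and cs[n-1]; Python raises on ""
  let n1 := pvOrdAt cs 0
  let n2 := pvOrdAt cs (n - 1)
  funnyLoopA cs n n1 n2 (List.range' 1 (n - 1))

-- ===== PORT B =====
def funnyString_alt (s : String) : String :=
  let cs := s.toList
  let diffs := (List.range' 1 (cs.length - 1)).map
    (fun i => (pvOrdAt cs (i - 1) - pvOrdAt cs i).natAbs)
  if diffs = diffs.reverse then "Funny" else "Not Funny"

-- ===== PRECONDITION & SPEC =====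
-- Pre_ excludes exactly the empty string, on which A raises IndexError at s[0].
def Pre_funnyString (s : String) : Prop := s ≠ ""
instance (s : String) : Decidable (Pre_funnyString s) := by unfold Pre_funnyString; infer_instance
def pvWitness_funnyString : String := "acba"

-- On the empty string A raises IndexError (it reads s[0]); B returns the funny verdict (empty diff list is a palindrome).
def Raises_funnyString (s : String) : Prop := s = ""
instance (s : String) : Decidable (Raises_funnyString s) := by unfold Raises_funnyString; infer_instance
def pvRaiseWitness_funnyString : String := ""
def pvRaiseWitnessOut_funnyString : String := "Funny"

def Spec_funnyString (s : String) (out : String) : Prop := out = funnyString_alt s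
instance (s : String) (out : String) : Decidable (Spec_funnyString s out) := by unfold Spec_funnyString; infer_instance

-- ===== CLAIM (what is proved, stated in full; the proofs are below) =====
def Claim_equal_funnyString : Prop := ∀ (s : String), Dom_funnyString s → Pre_funnyString s → Spec_funnyString s (funnyString s)
def Claim_raises_funnyString : Prop := (∀ (s : String), Dom_funnyString s → Raises_funnyString s → ¬ Pre_funnyString s) ∧ (Dom_funnyString (pvRaiseWitness_funnyString) ∧ Raises_funnyString (pvRaiseWitness_funnyString) ∧ funnyString_alt (pvRaiseWitness_funnyString) = pvRaiseWitnessOut_funnyString)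

-- ===== LEMMAS AND PROOFS =====

theorem pvNatAbsComm (a b : Int) : (a - b).natAbs = (b - a).natAbs := by omega

-- the per-index test A performs at index i (given the loop invariant on n1, n2)
def pvTest (cs : List Char) (n i : Nat) : Bool :=
  (pvOrdAt cs (i - 1) - pvOrdAt cs i).natAbs = (pvOrdAt cs (n - i) - pvOrdAt cs (n - i - 1)).natAbs

-- loop invariant: entering with n1 = ord cs[i-1], n2 = ord cs[n-i], the loop decides "all tests pass"
theorem funnyLoopA_eq (cs : List Char) (n : Nat) :
    ∀ (k i : Nat), 1 ≤ i →
      funnyLoopA cs n (pvOrdAt cs (i - 1)) (pvOrdAt cs (n - i)) (List.range' i k) =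
        (if (List.range' i k).all (pvTest cs n) then "Funny" else "Not Funny") := by
  intro k
  induction k with
  | zero => intro i _; simp [funnyLoopA]
  | succ k ih =>
    intro i hi
    rw [List.range'_succ]
    simp only [funnyLoopA, List.all_cons]
    by_cases h : pvTest cs n i
    · have hne : ¬ ((pvOrdAt cs (i - 1) - pvOrdAt cs i).natAbs ≠ (pvOrdAt cs (n - i) - pvOrdAt cs (n - i - 1)).natAbs) := by
        simpa [pvTest] using h
      rw [if_neg hne]
      have h1 : i = (i + 1) - 1 := by omega
      have h2 : n - i - 1 = n - (i + 1) := by omega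
      rw [h2]
      have := ih (i + 1) (by omega)
      rw [← h1] at this
      rw [this]
      simp only [h, Bool.true_and]
    · have hne : ((pvOrdAt cs (i - 1) - pvOrdAt cs i).natAbs ≠ (pvOrdAt cs (n - i) - pvOrdAt cs (n - i - 1)).natAbs) := by
        simpa [pvTest] using h
      rw [if_pos hne]
      have hf : pvTest cs n i = false := by simpa using h
      simp only [hf, Bool.false_and]
      simp

-- the palindrome condition of B, elementwise
theorem diffs_palindrome_iff (cs : List Char) (n : Nat) (hn : n = cs.length) :
    ((List.range' 1 (n - 1)).map (fun i => (pvOrdAt cs (i - 1) - pvOrdAt cs i).natAbs)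
      = ((List.range' 1 (n - 1)).map (fun i => (pvOrdAt cs (i - 1) - pvOrdAt cs i).natAbs)).reverse)
    ↔ ((List.range' 1 (n - 1)).all (pvTest cs n) = true) := by
  set m := n - 1 with hm
  set f : Nat → Nat := fun i => (pvOrdAt cs (i - 1) - pvOrdAt cs i).natAbs with hf
  set L := (List.range' 1 m).map f with hL
  have hlen : L.length = m := by simp [hL]
  have hget : ∀ (j : Nat) (h : j < m), L[j]'(by omega) = f (1 + j) := by
    intro j h
    simp [hL]
  constructor
  · intro hpal
    rw [List.all_eq_true]
    intro i hi
    have hmem := List.mem_range'_1.mp hi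
    have h1 : 1 ≤ i := hmem.1
    have h2 : i < 1 + m := hmem.2
    -- compare positions i-1 and m-1-(i-1) = m-i
    have hidx : i - 1 < m := by omega
    have := congrArg (fun (l : List Nat) => l[i-1]?) hpal
    simp only [List.getElem?_reverse (by omega : i - 1 < L.length), hlen] at this
    have e1 : L[i-1]'(by omega) = f (1 + (i - 1)) := hget _ hidx
    have e2 : L[m - 1 - (i-1)]'(by omega) = f (1 + (m - 1 - (i - 1))) := hget _ (by omega)
    have hq : L[i-1]? = L[m - 1 - (i-1)]? := this
    rw [List.getElem?_eq_getElem (by omega), List.getElem?_eq_getElem (by omega)] at hq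
    have hv : f (1 + (i - 1)) = f (1 + (m - 1 - (i - 1))) := by
      rw [← e1, ← e2]; exact Option.some.inj hq
    have hi' : 1 + (i - 1) = i := by omega
    have hj' : 1 + (m - 1 - (i - 1)) = n - i := by omega
    rw [hi', hj'] at hv
    -- pvTest: f i = |c(n-i) - c(n-i-1)| = f (n-i) by natAbs_sub_comm
    simp only [pvTest, decide_eq_true_eq]
    simp only [hf] at hv
    rw [hv, pvNatAbsComm]
  · intro hall
    apply List.ext_getElem (by simp)
    intro j hj hj'
    rw [List.getElem_reverse]
    have hjm : j < m := by omega
    have hjm' : L.length - 1 - j < m := by omega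
    rw [hget j hjm, hget _ hjm']
    rw [List.all_eq_true] at hall
    have h1 := hall (1 + j) (List.mem_range'_1.mpr ⟨by omega, by omega⟩)
    simp only [pvTest, decide_eq_true_eq] at h1
    have e1 : 1 + j - 1 = j := by omega
    rw [e1] at h1
    have e2 : 1 + (L.length - 1 - j) = n - (1 + j) := by omega
    rw [e2]
    simp only [hf]
    rw [e1, h1, pvNatAbsComm]

-- ===== VERDICT (by name: the statement is the Claim_ definition above) =====
theorem funnyString_spec : Claim_equal_funnyString := by
  intro s _ hpre
  unfold Spec_funnyString funnyString funnyString_alt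
  set cs := s.toList with hcs
  have hn : cs.length ≠ 0 := by
    intro h
    apply hpre
    have : cs = [] := List.eq_nil_of_length_eq_zero h
    rw [hcs] at this
    exact String.ext (by simpa using this)
  set n := cs.length with hnn
  have := funnyLoopA_eq cs n (n - 1) 1 (le_refl 1)
  simp only [show (1:Nat) - 1 = 0 from rfl] at this
  rw [this]
  have hp := diffs_palindrome_iff cs n rfl
  by_cases hpal : ((List.range' 1 (n - 1)).map (fun i => (pvOrdAt cs (i - 1) - pvOrdAt cs i).natAbs)
      = ((List.range' 1 (n - 1)).map (fun i => (pvOrdAt cs (i - 1) - pvOrdAt cs i).natAbs)).reverse)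
  · rw [if_pos (hp.mp hpal), if_pos hpal]
  · rw [if_neg (fun h => hpal (hp.mpr h)), if_neg hpal]

def funnyString_raises : Claim_raises_funnyString := by
  unfold Claim_raises_funnyString
  constructor
  · intro s _ hr
    unfold Raises_funnyString at hr
    unfold Pre_funnyString
    simp [hr]
  · exact ⟨by decide, by decide, by decide⟩
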